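-- pv_equiv track=rewrite | github.com/Pennyw0rth/NetExec | nxc/modules/sch_task_enum.py | _normalize_env_paths
-- ===== SOURCE A (Python) =====
-- def _normalize_env_paths(path):
--     """
--     Normalize common environment variables and slashes to enable System32 checks.
--     """
--     if path is None:
--         return None
--     p = path.strip().strip('"')
--     replacements = {
--         "%SystemRoot%": r"C:\Windows",
--         "%WinDir%": r"C:\Windows",
--         "%ProgramFiles%": r"C:\Program Files",
--         "%ProgramFiles(x86)%": r"C:\Program Files (x86)",
--     }
--     for k, v in replacements.items():
--         p = p.replace(k, v)
--     return p.replace("/", "\\")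
-- ===== SOURCE B (Python) =====
-- def _normalize_env_paths(path):
--     """
--     Normalize common environment variables and slashes to enable System32 checks.
--     """
--     if path is None:
--         return None
--     p = path.strip().strip('"')
--     table = (
--         ("%SystemRoot%", "C:\\Windows"),
--         ("%WinDir%", "C:\\Windows"),
--         ("%ProgramFiles(x86)%", "C:\\Program Files (x86)"),
--         ("%ProgramFiles%", "C:\\Program Files"),
--         ("/", "\\"),
--     )
--     out = []
--     i = 0
--     n = len(p)
--     while i < n:
--         for k, v in table:
--             if p.startswith(k, i):
--                 out.append(v)
--                 i += len(k)
--                 break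
--         else:
--             out.append(p[i])
--             i += 1
--     return "".join(out)
-- ===== Notes on version B (the rewrite author's own statement) =====
-- stated objective: alternative
-- what changed: Replaced A's four sequential whole-string str.replace passes plus a final slash-replace pass by a single left-to-right scan that, at each position, matches the first table key (env var or '/') and emits its replacement.
-- outside the precondition, e.g. on _normalize_env_paths('%WinDir%SystemRoot%'): A returns '%WinDirC:\\Windows', B returns 'C:\\WindowsSystemRoot%'
import Mathlib
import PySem

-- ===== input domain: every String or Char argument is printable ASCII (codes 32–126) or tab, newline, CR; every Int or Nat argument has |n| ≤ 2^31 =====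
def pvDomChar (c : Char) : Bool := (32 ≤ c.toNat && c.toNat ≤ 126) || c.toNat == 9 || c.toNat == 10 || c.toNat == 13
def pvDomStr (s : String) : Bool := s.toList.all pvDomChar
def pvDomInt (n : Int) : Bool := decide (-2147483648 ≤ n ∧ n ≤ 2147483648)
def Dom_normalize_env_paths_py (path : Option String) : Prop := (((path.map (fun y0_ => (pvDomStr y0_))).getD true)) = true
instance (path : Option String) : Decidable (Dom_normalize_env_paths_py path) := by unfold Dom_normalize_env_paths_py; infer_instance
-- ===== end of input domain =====

-- B replaces A's four sequential str.replace passes plus a final slash pass by ONE left-to-right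
-- first-match scan over the string (objective: alternative single-pass algorithm).

-- ===== PORT A =====
def normalize_env_paths_py (path : Option String) : Option String :=
  match path with
  | none => none
  | some path =>
    let p := PySem.Str.stripChars (PySem.Str.strip path) "\""
    let replacements : PySem.Dict String String := PySem.Dict.mk
      [("%SystemRoot%", "C:\\Windows"),
       ("%WinDir%", "C:\\Windows"),
       ("%ProgramFiles%", "C:\\Program Files"),
       ("%ProgramFiles(x86)%", "C:\\Program Files (x86)")]
    let p := replacements.items.foldl (fun acc kv => PySem.Str.replace acc kv.1 kv.2) p
    some (PySem.Str.replace p "/" "\\")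

-- ===== PORT B =====
-- B's scanner: at each position try the table keys (first match wins), else map '/'→'\', else copy.
def pvScanB : List Char → List Char
  | [] => []
  | c :: t =>
    if ("%SystemRoot%".toList).isPrefixOf (c :: t) then "C:\\Windows".toList ++ pvScanB (List.drop 11 t)
    else if ("%WinDir%".toList).isPrefixOf (c :: t) then "C:\\Windows".toList ++ pvScanB (List.drop 7 t)
    else if ("%ProgramFiles(x86)%".toList).isPrefixOf (c :: t) then "C:\\Program Files (x86)".toList ++ pvScanB (List.drop 18 t)
    else if ("%ProgramFiles%".toList).isPrefixOf (c :: t) then "C:\\Program Files".toList ++ pvScanB (List.drop 13 t)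
    else if c = '/' then '\\' :: pvScanB t
    else c :: pvScanB t
termination_by l => l.length
decreasing_by all_goals first
  | (simp [List.length_drop]; omega)
  | simp [List.length_drop]

def normalize_env_paths_py_alt (path : Option String) : Option String :=
  match path with
  | none => none
  | some path =>
    let p := PySem.Str.stripChars (PySem.Str.strip path) "\""
    some (String.ofList (pvScanB p.toList))

-- ===== PRECONDITION & SPEC =====
-- Pre_ excludes strings containing two overlapping env-var tokens sharing a '%' in which the
-- later-in-string token belongs to an earlier replace pass: there A's pass-by-pass replacement
-- order is accidental and B's left-to-right first-match result is equally defensible.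
def pvBadStrs : List String :=
  ["%WinDir%SystemRoot%",
   "%ProgramFiles%SystemRoot%",
   "%ProgramFiles%WinDir%",
   "%ProgramFiles(x86)%SystemRoot%",
   "%ProgramFiles(x86)%WinDir%",
   "%ProgramFiles(x86)%ProgramFiles%"]
def Pre_normalize_env_paths_py (path : Option String) : Prop :=
  (match path with
   | none => true
   | some s => pvBadStrs.all (fun b => !(PySem.Str.isIn b s))) = true
instance (path : Option String) : Decidable (Pre_normalize_env_paths_py path) := by
  unfold Pre_normalize_env_paths_py; infer_instance
def pvWitness_normalize_env_paths_py : Option String := some " \"%SystemRoot%/System32/foo\" "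
def Spec_normalize_env_paths_py (path : Option String) (out : Option String) : Prop := out = normalize_env_paths_py_alt path
instance (path : Option String) (out : Option String) : Decidable (Spec_normalize_env_paths_py path out) := by unfold Spec_normalize_env_paths_py; infer_instance

-- ===== CLAIM (what is proved, stated in full; the proofs are below) =====
def Claim_equal_normalize_env_paths_py : Prop := ∀ (path : Option String), Dom_normalize_env_paths_py path → Pre_normalize_env_paths_py path → Spec_normalize_env_paths_py path (normalize_env_paths_py path)

-- ===== LEMMAS AND PROOFS =====

-- short names for the keys and values
def pvK1 : List Char := "%SystemRoot%".toList
def pvK2 : List Char := "%WinDir%".toList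
def pvK3 : List Char := "%ProgramFiles%".toList
def pvK4 : List Char := "%ProgramFiles(x86)%".toList
def pvV1 : List Char := "C:\\Windows".toList
def pvV3 : List Char := "C:\\Program Files".toList
def pvV4 : List Char := "C:\\Program Files (x86)".toList

-- structural model of Python's str.replace (all occurrences, left to right), pattern nonempty
def pvRepl (old new : List Char) : List Char → List Char
  | [] => []
  | c :: t =>
    if old.isPrefixOf (c :: t) then new ++ pvRepl old new (List.drop (old.length - 1) t)
    else c :: pvRepl old new t
termination_by l => l.length
decreasing_by all_goals first
  | (simp [List.length_drop]; omega)
  | simp [List.length_drop]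

-- A's composite transform, at the char-list level
def pvComp (l : List Char) : List Char :=
  pvRepl ['/'] ['\\'] (pvRepl pvK4 pvV4 (pvRepl pvK3 pvV3 (pvRepl pvK2 pvV1 (pvRepl pvK1 pvV1 l))))

def pvBadsL : List (List Char) :=
  [pvK2 ++ pvK1.tail, pvK3 ++ pvK1.tail, pvK3 ++ pvK2.tail,
   pvK4 ++ pvK1.tail, pvK4 ++ pvK2.tail, pvK4 ++ pvK3.tail]
def pvNoOv (l : List Char) : Prop := ∀ b ∈ pvBadsL, ¬ b <:+: l

theorem pvReplGo_eq (old new : List Char) (h : old ≠ []) :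
    ∀ fuel l acc, l.length ≤ fuel →
      PySem.Chars.replace.go old new fuel l acc = acc.reverse ++ pvRepl old new l := by
  intro fuel
  induction fuel with
  | zero =>
    intro l acc hl
    have : l = [] := by cases l <;> simp_all
    subst this
    simp [PySem.Chars.replace.go, pvRepl]
  | succ n ih =>
    intro l acc hl
    cases l with
    | nil => simp [PySem.Chars.replace.go, pvRepl]
    | cons c t =>
      rw [PySem.Chars.replace.go]
      by_cases hp : old.isPrefixOf (c :: t)
      · rw [if_pos hp]
        obtain ⟨m, hm⟩ : ∃ m, old.length = m + 1 := by
          cases old with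
          | nil => exact absurd rfl h
          | cons a b => exact ⟨b.length, by simp⟩
        have hdrop : List.drop old.length (c :: t) = List.drop (old.length - 1) t := by
          rw [hm]; simp
        rw [hdrop, ih _ _ (by simp at hl; simp [List.length_drop]; omega)]
        rw [pvRepl, if_pos hp]
        simp
      · rw [if_neg hp, ih _ _ (by simp at hl ⊢; omega)]
        rw [pvRepl, if_neg hp]
        simp

theorem pvChars_replace_eq (old new l : List Char) (h : old ≠ []) :
    PySem.Chars.replace l old new = pvRepl old new l := by
  rw [PySem.Chars.replace, if_neg (by simpa using h)]
  simpa using pvReplGo_eq old new h l.length l [] le_rfl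

theorem pvRepl_nil (old new : List Char) : pvRepl old new [] = [] := by rw [pvRepl]

theorem pvRepl_cons_neg (old new : List Char) {c : Char} {t : List Char}
    (h : ¬ old <+: (c :: t)) : pvRepl old new (c :: t) = c :: pvRepl old new t := by
  rw [pvRepl, if_neg (by simpa [List.isPrefixOf_iff_prefix] using h)]

theorem pvRepl_match (old new l : List Char) (h0 : old ≠ []) (h : old <+: l) :
    pvRepl old new l = new ++ pvRepl old new (List.drop old.length l) := by
  cases l with
  | nil => obtain ⟨x, hx⟩ := h; cases old <;> simp_all
  | cons c t =>
    rw [pvRepl, if_pos (by simpa [List.isPrefixOf_iff_prefix] using h)]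
    obtain ⟨m, hm⟩ : ∃ m, old.length = m + 1 := by
      cases old with
      | nil => exact absurd rfl h0
      | cons a b => exact ⟨b.length, by simp⟩
    rw [hm]; simp

theorem pv_not_prefix_append {a b x : List Char} (h1 : ¬ a <+: b) (h2 : ¬ b <+: a) :
    ¬ a <+: (b ++ x) := by
  intro h
  rcases Nat.lt_or_ge b.length a.length with hlt | hle
  · exact h2 (List.prefix_of_prefix_length_le (List.prefix_append b x) h (Nat.le_of_lt hlt))
  · exact h1 (List.prefix_of_prefix_length_le h (List.prefix_append b x) hle)

theorem pv_not_prefix_cons_of_head_ne {P : List Char} {p0 c : Char} {t : List Char}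
    (hP : P.head? = some p0) (hne : p0 ≠ c) : ¬ P <+: (c :: t) := by
  intro h
  cases P with
  | nil => simp at hP
  | cons q qs =>
    rcases List.cons_prefix_cons.mp h with ⟨rfl, -⟩
    simp at hP
    exact hne (hP.symm)

theorem pvRepl_skip (old new : List Char) :
    ∀ (a x : List Char), (∀ i, i < a.length → ¬ old <+: List.drop i (a ++ x)) →
      pvRepl old new (a ++ x) = a ++ pvRepl old new x := by
  intro a
  induction a with
  | nil => intro x _; simp
  | cons c a' ih =>
    intro x hyp
    have h0 : ¬ old <+: (c :: (a' ++ x)) := by simpa using hyp 0 (by simp)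
    rw [List.cons_append, pvRepl_cons_neg old new h0, ih x ?_]
    · simp
    intro i hi
    have := hyp (i + 1) (by simp; omega)
    simpa using this

theorem pv_not_prefix_drop_of_head_notMem {p0 : Char} {P' : List Char} :
    ∀ (a : List Char) (x : List Char) (i : Nat), p0 ∉ a → i < a.length →
      ¬ (p0 :: P') <+: List.drop i (a ++ x) := by
  intro a
  induction a with
  | nil => intro x i _ hi; simp at hi
  | cons b a' ih =>
    intro x i hmem hi
    cases i with
    | zero =>
      intro hpre
      rw [List.drop_zero, List.cons_append] at hpre
      rcases hpre with ⟨r, hr⟩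
      simp at hr
      exact hmem (by simp [hr.1])
    | succ j =>
      rw [List.cons_append, List.drop_succ_cons]
      exact ih x j (fun hm => hmem (List.mem_cons_of_mem _ hm)) (by simp at hi; omega)

theorem pvRepl_pass {P : List Char} (new : List Char) {p0 : Char} {a : List Char}
    (x : List Char) (hP : P.head? = some p0) (hmem : p0 ∉ a) :
    pvRepl P new (a ++ x) = a ++ pvRepl P new x := by
  cases P with
  | nil => simp at hP
  | cons q qs =>
    simp at hP
    subst hP
    exact pvRepl_skip _ _ a x (fun i hi => pv_not_prefix_drop_of_head_notMem a x i hmem hi)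

-- no new front occurrence: a nonempty key-suffix prefixing the output prefixes the input
theorem pvRepl_front_reflect (P V : List Char) (hV1 : '%' ∉ V) (hV2 : '\\' ∈ V) :
    ∀ (l w : List Char), w ≠ [] → w.getLast? = some '%' → '\\' ∉ w →
      w <+: pvRepl P V l → w <+: l := by
  intro l
  induction l with
  | nil => intro w hw _ _ hp; rw [pvRepl_nil] at hp; simp_all [List.prefix_nil]
  | cons c t ih =>
    intro w hw hlast hbsl hp
    rw [pvRepl] at hp
    split at hp
    · exfalso
      rcases Nat.lt_or_ge V.length w.length with hlt | hle
      · have hVw : V <+: w :=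
          List.prefix_of_prefix_length_le (List.prefix_append V _) hp (Nat.le_of_lt hlt)
        exact hbsl (hVw.subset hV2)
      · have hwV : w <+: V :=
          List.prefix_of_prefix_length_le hp (List.prefix_append V _) hle
        exact hV1 (hwV.subset (List.mem_of_getLast? hlast))
    · cases w with
      | nil => exact absurd rfl hw
      | cons w0 w' =>
        rcases (List.cons_prefix_cons.mp hp) with ⟨rfl, hw'⟩
        cases w' with
        | nil => simpa using List.cons_prefix_cons.mpr ⟨rfl, List.nil_prefix⟩
        | cons y ys =>
          have := ih (y :: ys) (by simp) (by simpa using hlast) (by simp_all) hw'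
          exact List.cons_prefix_cons.mpr ⟨rfl, this⟩

-- skipping a key block: no occurrence of Ki starts inside Kj
theorem pv_no_occ_in_block (Ki Kj x : List Char)
    (h0 : ¬ Ki <+: (Kj ++ x))
    (hov : ¬ Ki <+: List.drop (Kj.length - 1) (Kj ++ x))
    (hiK : Ki.head? = some '%')
    (hmid : ∀ m, m < Kj.length → 0 < m → m + 1 < Kj.length → Kj[m]? ≠ some '%') :
    ∀ i, i < Kj.length → ¬ Ki <+: List.drop i (Kj ++ x) := by
  intro i hi hp
  rcases Nat.eq_zero_or_pos i with rfl | hpos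
  · exact h0 (by simpa using hp)
  by_cases hend : i = Kj.length - 1
  · exact hov (hend ▸ hp)
  · have hlen : i < Kj.length := hi
    have hhead : (List.drop i (Kj ++ x)).head? = (Kj ++ x)[i]? := List.head?_drop
    have hKi : Ki = '%' :: Ki.tail := by
      cases Ki <;> simp_all
    rw [hKi] at hp
    rcases hp with ⟨r, hr⟩
    have : (Kj ++ x)[i]? = some '%' := by
      rw [← hhead, ← hr]; simp
    rw [List.getElem?_append_left hlen] at this
    exact hmid i hi (by omega) (by omega) this

theorem pv_drop_pred_append :
    ∀ (Kj x : List Char), Kj.getLast? = some '%' →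
      List.drop (Kj.length - 1) (Kj ++ x) = '%' :: x := by
  intro Kj
  induction Kj with
  | nil => intro x h; simp at h
  | cons a t ih =>
    intro x h
    cases t with
    | nil => simp_all
    | cons b t2 =>
      have : (a :: b :: t2).length - 1 = (b :: t2).length := by simp
      rw [this, List.cons_append]
      have hlen : (b :: t2).length = ((b :: t2).length - 1) + 1 := by simp
      rw [hlen, List.drop_succ_cons]
      exact ih x (by simpa using h)

-- an overlapping pair of key occurrences forces one of the excluded substrings
theorem pv_block_ov (Ki Kj x : List Char)
    (hKj : Kj.getLast? = some '%') (hKi : Ki.head? = some '%')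
    (hnt : ¬ Ki.tail <+: x) :
    ¬ Ki <+: List.drop (Kj.length - 1) (Kj ++ x) := by
  intro h
  rw [pv_drop_pred_append Kj x hKj] at h
  have hKi' : Ki = '%' :: Ki.tail := by cases Ki <;> simp_all
  rw [hKi'] at h
  exact hnt (List.cons_prefix_cons.mp h).2

theorem pvNoOv_mono {l l' : List Char} (h : l' <:+: l) (hno : pvNoOv l) : pvNoOv l' :=
  fun b hb hbl => hno b hb (hbl.trans h)

theorem pv_infix_stripChars (l ch : List Char) : PySem.Chars.stripChars l ch <:+: l := by
  rw [PySem.Chars.stripChars]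
  have h1 : List.dropWhile (fun c => ch.contains c) l <:+ l := List.dropWhile_suffix _
  have h2 : (List.dropWhile (fun c => ch.contains c)
      (List.dropWhile (fun c => ch.contains c) l).reverse).reverse <+:
      List.dropWhile (fun c => ch.contains c) l := by
    have := List.reverse_prefix.mpr
      (List.dropWhile_suffix (l := (List.dropWhile (fun c => ch.contains c) l).reverse)
        (fun c => ch.contains c))
    simpa using this
  exact h2.isInfix.trans h1.isInfix

theorem pv_infix_strip (l : List Char) : PySem.Chars.strip l <:+: l := by
  rw [PySem.Chars.strip, PySem.Chars.rstrip, PySem.Chars.lstrip]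
  have h1 : List.dropWhile PySem.Chars.isspace l <:+ l := List.dropWhile_suffix _
  have h2 : (List.dropWhile PySem.Chars.isspace
      (List.dropWhile PySem.Chars.isspace l).reverse).reverse <+:
      List.dropWhile PySem.Chars.isspace l := by
    have := List.reverse_prefix.mpr
      (List.dropWhile_suffix (l := (List.dropWhile PySem.Chars.isspace l).reverse)
        PySem.Chars.isspace)
    simpa using this
  exact h2.isInfix.trans h1.isInfix

-- block skip, packaged
theorem pv_skip_key (Ki V Kj x : List Char)
    (h01 : ¬ Ki <+: Kj) (h02 : ¬ Kj <+: Ki)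
    (hKj : Kj.getLast? = some '%') (hKi : Ki.head? = some '%')
    (hmid : ∀ m, m < Kj.length → 0 < m → m + 1 < Kj.length → Kj[m]? ≠ some '%')
    (hnt : ¬ Ki.tail <+: x) :
    pvRepl Ki V (Kj ++ x) = Kj ++ pvRepl Ki V x :=
  pvRepl_skip Ki V Kj x
    (pv_no_occ_in_block Ki Kj x (pv_not_prefix_append h01 h02)
      (pv_block_ov Ki Kj x hKj hKi hnt) hKi hmid)

theorem pv_comp_K1 (x : List Char) : pvComp (pvK1 ++ x) = pvV1 ++ pvComp x := by
  unfold pvComp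
  rw [pvRepl_match pvK1 pvV1 _ (by decide) (List.prefix_append _ _), List.drop_left]
  rw [pvRepl_pass pvV1 _ (show pvK2.head? = some '%' from by decide) (show '%' ∉ pvV1 from by decide)]
  rw [pvRepl_pass pvV3 _ (show pvK3.head? = some '%' from by decide) (show '%' ∉ pvV1 from by decide)]
  rw [pvRepl_pass pvV4 _ (show pvK4.head? = some '%' from by decide) (show '%' ∉ pvV1 from by decide)]
  rw [pvRepl_pass ['\\'] _ (show (['/'] : List Char).head? = some '/' from by decide) (show '/' ∉ pvV1 from by decide)]

theorem pv_comp_K2 (x : List Char)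
    (hnt1 : ¬ pvK1.tail <+: x) :
    pvComp (pvK2 ++ x) = pvV1 ++ pvComp x := by
  unfold pvComp
  rw [pv_skip_key pvK1 pvV1 pvK2 x (by decide) (by decide) (by decide) (by decide) (by decide) hnt1]
  rw [pvRepl_match pvK2 pvV1 _ (by decide) (List.prefix_append _ _), List.drop_left]
  rw [pvRepl_pass pvV3 _ (show pvK3.head? = some '%' from by decide) (show '%' ∉ pvV1 from by decide)]
  rw [pvRepl_pass pvV4 _ (show pvK4.head? = some '%' from by decide) (show '%' ∉ pvV1 from by decide)]
  rw [pvRepl_pass ['\\'] _ (show (['/'] : List Char).head? = some '/' from by decide) (show '/' ∉ pvV1 from by decide)]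

theorem pv_comp_K3 (x : List Char)
    (hnt1 : ¬ pvK1.tail <+: x)
    (hnt2 : ¬ pvK2.tail <+: x) :
    pvComp (pvK3 ++ x) = pvV3 ++ pvComp x := by
  have hnt2' : ¬ pvK2.tail <+: pvRepl pvK1 pvV1 x := fun h =>
    hnt2 (pvRepl_front_reflect pvK1 pvV1 (by decide) (by decide) x pvK2.tail
      (by decide) (by decide) (by decide) h)
  unfold pvComp
  rw [pv_skip_key pvK1 pvV1 pvK3 x (by decide) (by decide) (by decide) (by decide) (by decide) hnt1]
  rw [pv_skip_key pvK2 pvV1 pvK3 (pvRepl pvK1 pvV1 x) (by decide) (by decide) (by decide) (by decide) (by decide) hnt2']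
  rw [pvRepl_match pvK3 pvV3 _ (by decide) (List.prefix_append _ _), List.drop_left]
  rw [pvRepl_pass pvV4 _ (show pvK4.head? = some '%' from by decide) (show '%' ∉ pvV3 from by decide)]
  rw [pvRepl_pass ['\\'] _ (show (['/'] : List Char).head? = some '/' from by decide) (show '/' ∉ pvV3 from by decide)]

theorem pv_comp_K4 (x : List Char)
    (hnt1 : ¬ pvK1.tail <+: x)
    (hnt2 : ¬ pvK2.tail <+: x)
    (hnt3 : ¬ pvK3.tail <+: x) :
    pvComp (pvK4 ++ x) = pvV4 ++ pvComp x := by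
  have hnt2' : ¬ pvK2.tail <+: pvRepl pvK1 pvV1 x := fun h =>
    hnt2 (pvRepl_front_reflect pvK1 pvV1 (by decide) (by decide) x pvK2.tail
      (by decide) (by decide) (by decide) h)
  have hnt3' : ¬ pvK3.tail <+: pvRepl pvK2 pvV1 (pvRepl pvK1 pvV1 x) := fun h =>
    hnt3 (pvRepl_front_reflect pvK1 pvV1 (by decide) (by decide) x pvK3.tail
      (by decide) (by decide) (by decide)
      (pvRepl_front_reflect pvK2 pvV1 (by decide) (by decide) _ pvK3.tail
        (by decide) (by decide) (by decide) h))
  unfold pvComp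
  rw [pv_skip_key pvK1 pvV1 pvK4 x (by decide) (by decide) (by decide) (by decide) (by decide) hnt1]
  rw [pv_skip_key pvK2 pvV1 pvK4 (pvRepl pvK1 pvV1 x) (by decide) (by decide) (by decide) (by decide) (by decide) hnt2']
  rw [pv_skip_key pvK3 pvV3 pvK4 (pvRepl pvK2 pvV1 (pvRepl pvK1 pvV1 x)) (by decide) (by decide) (by decide) (by decide) (by decide) hnt3']
  rw [pvRepl_match pvK4 pvV4 _ (by decide) (List.prefix_append _ _), List.drop_left]
  rw [pvRepl_pass ['\\'] _ (show (['/'] : List Char).head? = some '/' from by decide) (show '/' ∉ pvV4 from by decide)]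

theorem pv_comp_slash (x : List Char) : pvComp ('/' :: x) = '\\' :: pvComp x := by
  unfold pvComp
  rw [pvRepl_cons_neg pvK1 pvV1 (pv_not_prefix_cons_of_head_ne (P := pvK1) (p0 := '%') (c := '/') (by decide) (by decide))]
  rw [pvRepl_cons_neg pvK2 pvV1 (pv_not_prefix_cons_of_head_ne (P := pvK2) (p0 := '%') (c := '/') (by decide) (by decide))]
  rw [pvRepl_cons_neg pvK3 pvV3 (pv_not_prefix_cons_of_head_ne (P := pvK3) (p0 := '%') (c := '/') (by decide) (by decide))]
  rw [pvRepl_cons_neg pvK4 pvV4 (pv_not_prefix_cons_of_head_ne (P := pvK4) (p0 := '%') (c := '/') (by decide) (by decide))]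
  rw [pvRepl_match ['/'] ['\\'] _ (by decide)
    (List.cons_prefix_cons.mpr ⟨rfl, List.nil_prefix⟩)]
  simp

theorem pv_comp_other (c : Char) (x : List Char) (hc : c ≠ '/')
    (h1 : ¬ pvK1 <+: (c :: x)) (h2 : ¬ pvK2 <+: (c :: x))
    (h3 : ¬ pvK3 <+: (c :: x)) (h4 : ¬ pvK4 <+: (c :: x)) :
    pvComp (c :: x) = c :: pvComp x := by
  unfold pvComp
  have e1 := pvRepl_cons_neg pvK1 pvV1 (t := x) h1
  have n2 : ¬ pvK2 <+: (c :: pvRepl pvK1 pvV1 x) := by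
    rw [← e1]; intro h
    exact h2 (pvRepl_front_reflect pvK1 pvV1 (by decide) (by decide) _ pvK2 (by decide) (by decide) (by decide) h)
  have e2 := pvRepl_cons_neg pvK2 pvV1 n2
  have n3 : ¬ pvK3 <+: (c :: pvRepl pvK2 pvV1 (pvRepl pvK1 pvV1 x)) := by
    rw [← e2, ← e1]; intro h
    exact h3 (pvRepl_front_reflect pvK1 pvV1 (by decide) (by decide) _ pvK3 (by decide) (by decide) (by decide)
      (pvRepl_front_reflect pvK2 pvV1 (by decide) (by decide) _ pvK3 (by decide) (by decide) (by decide) h))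
  have e3 := pvRepl_cons_neg pvK3 pvV3 n3
  have n4 : ¬ pvK4 <+: (c :: pvRepl pvK3 pvV3 (pvRepl pvK2 pvV1 (pvRepl pvK1 pvV1 x))) := by
    rw [← e3, ← e2, ← e1]; intro h
    exact h4 (pvRepl_front_reflect pvK1 pvV1 (by decide) (by decide) _ pvK4 (by decide) (by decide) (by decide)
      (pvRepl_front_reflect pvK2 pvV1 (by decide) (by decide) _ pvK4 (by decide) (by decide) (by decide)
        (pvRepl_front_reflect pvK3 pvV3 (by decide) (by decide) _ pvK4 (by decide) (by decide) (by decide) h)))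
  have e4 := pvRepl_cons_neg pvK4 pvV4 n4
  rw [e1, e2, e3, e4]
  rw [pvRepl_cons_neg ['/'] ['\\'] (pv_not_prefix_cons_of_head_ne (P := ['/']) (p0 := '/') (by decide) (Ne.symm hc))]

theorem pv_scan_nil : pvScanB [] = [] := by rw [pvScanB]

theorem pv_comp_nil : pvComp [] = [] := by
  unfold pvComp
  rw [pvRepl_nil, pvRepl_nil, pvRepl_nil, pvRepl_nil, pvRepl_nil]

theorem pv_scan_K1 (x : List Char) : pvScanB (pvK1 ++ x) = pvV1 ++ pvScanB x := by
  rw [show pvK1 = '%' :: "SystemRoot%".toList from by decide, List.cons_append, pvScanB]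
  rw [if_pos (by
    rw [List.isPrefixOf_iff_prefix,
      show ("%SystemRoot%".toList : List Char) = '%' :: "SystemRoot%".toList from by decide]
    exact List.cons_prefix_cons.mpr ⟨rfl, List.prefix_append _ _⟩)]
  rw [show (11 : Nat) = ("SystemRoot%".toList : List Char).length from by decide, List.drop_left]
  rfl

theorem pv_scan_K2 (x : List Char)
    (h1 : ¬ pvK1 <+: (pvK2 ++ x)) : pvScanB (pvK2 ++ x) = pvV1 ++ pvScanB x := by
  rw [show pvK2 = '%' :: "WinDir%".toList from by decide, List.cons_append, pvScanB]
  rw [if_neg (by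
    rw [List.isPrefixOf_iff_prefix, ← List.cons_append,
      ← show pvK2 = '%' :: "WinDir%".toList from by decide]
    exact h1)]
  rw [if_pos (by
    rw [List.isPrefixOf_iff_prefix,
      show ("%WinDir%".toList : List Char) = '%' :: "WinDir%".toList from by decide]
    exact List.cons_prefix_cons.mpr ⟨rfl, List.prefix_append _ _⟩)]
  rw [show (7 : Nat) = ("WinDir%".toList : List Char).length from by decide, List.drop_left]
  rfl

theorem pv_scan_K4 (x : List Char)
    (h1 : ¬ pvK1 <+: (pvK4 ++ x)) (h2 : ¬ pvK2 <+: (pvK4 ++ x)) :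
    pvScanB (pvK4 ++ x) = pvV4 ++ pvScanB x := by
  rw [show pvK4 = '%' :: "ProgramFiles(x86)%".toList from by decide, List.cons_append, pvScanB]
  rw [if_neg (by
    rw [List.isPrefixOf_iff_prefix, ← List.cons_append,
      ← show pvK4 = '%' :: "ProgramFiles(x86)%".toList from by decide]
    exact h1)]
  rw [if_neg (by
    rw [List.isPrefixOf_iff_prefix, ← List.cons_append,
      ← show pvK4 = '%' :: "ProgramFiles(x86)%".toList from by decide]
    exact h2)]
  rw [if_pos (by
    rw [List.isPrefixOf_iff_prefix,
      show ("%ProgramFiles(x86)%".toList : List Char) = '%' :: "ProgramFiles(x86)%".toList from by decide]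
    exact List.cons_prefix_cons.mpr ⟨rfl, List.prefix_append _ _⟩)]
  rw [show (18 : Nat) = ("ProgramFiles(x86)%".toList : List Char).length from by decide, List.drop_left]
  rfl

theorem pv_scan_K3 (x : List Char)
    (h1 : ¬ pvK1 <+: (pvK3 ++ x)) (h2 : ¬ pvK2 <+: (pvK3 ++ x))
    (h4 : ¬ pvK4 <+: (pvK3 ++ x)) :
    pvScanB (pvK3 ++ x) = pvV3 ++ pvScanB x := by
  rw [show pvK3 = '%' :: "ProgramFiles%".toList from by decide, List.cons_append, pvScanB]
  rw [if_neg (by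
    rw [List.isPrefixOf_iff_prefix, ← List.cons_append,
      ← show pvK3 = '%' :: "ProgramFiles%".toList from by decide]
    exact h1)]
  rw [if_neg (by
    rw [List.isPrefixOf_iff_prefix, ← List.cons_append,
      ← show pvK3 = '%' :: "ProgramFiles%".toList from by decide]
    exact h2)]
  rw [if_neg (by
    rw [List.isPrefixOf_iff_prefix, ← List.cons_append,
      ← show pvK3 = '%' :: "ProgramFiles%".toList from by decide]
    exact h4)]
  rw [if_pos (by
    rw [List.isPrefixOf_iff_prefix,
      show ("%ProgramFiles%".toList : List Char) = '%' :: "ProgramFiles%".toList from by decide]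
    exact List.cons_prefix_cons.mpr ⟨rfl, List.prefix_append _ _⟩)]
  rw [show (13 : Nat) = ("ProgramFiles%".toList : List Char).length from by decide, List.drop_left]
  rfl

theorem pv_scan_slash (x : List Char) : pvScanB ('/' :: x) = '\\' :: pvScanB x := by
  rw [pvScanB]
  rw [if_neg (by
    rw [List.isPrefixOf_iff_prefix]
    exact pv_not_prefix_cons_of_head_ne (p0 := '%') (by decide) (by decide))]
  rw [if_neg (by
    rw [List.isPrefixOf_iff_prefix]
    exact pv_not_prefix_cons_of_head_ne (p0 := '%') (by decide) (by decide))]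
  rw [if_neg (by
    rw [List.isPrefixOf_iff_prefix]
    exact pv_not_prefix_cons_of_head_ne (p0 := '%') (by decide) (by decide))]
  rw [if_neg (by
    rw [List.isPrefixOf_iff_prefix]
    exact pv_not_prefix_cons_of_head_ne (p0 := '%') (by decide) (by decide))]
  rw [if_pos rfl]

theorem pv_scan_other (c : Char) (x : List Char) (hc : c ≠ '/')
    (h1 : ¬ pvK1 <+: (c :: x)) (h2 : ¬ pvK2 <+: (c :: x))
    (h3 : ¬ pvK3 <+: (c :: x)) (h4 : ¬ pvK4 <+: (c :: x)) :
    pvScanB (c :: x) = c :: pvScanB x := by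
  rw [pvScanB]
  rw [if_neg (by rw [List.isPrefixOf_iff_prefix]; exact h1)]
  rw [if_neg (by rw [List.isPrefixOf_iff_prefix]; exact h2)]
  rw [if_neg (by rw [List.isPrefixOf_iff_prefix]; exact h4)]
  rw [if_neg (by rw [List.isPrefixOf_iff_prefix]; exact h3)]
  rw [if_neg hc]

theorem pv_bad_of_tail_prefix {Kj Kt : List Char} (x : List Char)
    (h : Kt <+: x) : (Kj ++ Kt) <:+: (Kj ++ x) := by
  rcases h with ⟨r, hr⟩
  exact ⟨[], r, by simp [← hr]⟩

theorem pv_comp_eq_scan : ∀ (n : Nat) (l : List Char), l.length ≤ n → pvNoOv l →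
    pvComp l = pvScanB l := by
  intro n
  induction n with
  | zero =>
    intro l hl _
    have : l = [] := by cases l <;> simp_all
    subst this
    rw [pv_comp_nil, pv_scan_nil]
  | succ n ih =>
    intro l hl hno
    cases l with
    | nil => rw [pv_comp_nil, pv_scan_nil]
    | cons c t =>
      have hlen : t.length ≤ n := by simp at hl; omega
      by_cases h1 : pvK1 <+: (c :: t)
      · obtain ⟨x, hx⟩ := h1
        have hno' : pvNoOv (pvK1 ++ x) := by rw [hx]; exact hno
        rw [← hx, pv_comp_K1, pv_scan_K1, ih x ?_ ?_]
        · have := congrArg List.length hx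
          simp [pvK1] at this
          simp at hl
          omega
        · exact pvNoOv_mono (List.suffix_append _ _).isInfix hno'
      · by_cases h2 : pvK2 <+: (c :: t)
        · obtain ⟨x, hx⟩ := h2
          have hno' : pvNoOv (pvK2 ++ x) := by rw [hx]; exact hno
          have hnt1 : ¬ pvK1.tail <+: x := fun hp =>
            hno' _ (by simp [pvBadsL]) (pv_bad_of_tail_prefix x hp)
          rw [← hx, pv_comp_K2 x hnt1, pv_scan_K2 x (by rw [hx]; exact h1), ih x ?_ ?_]
          · have := congrArg List.length hx
            simp [pvK2] at this
            simp at hl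
            omega
          · exact pvNoOv_mono (List.suffix_append _ _).isInfix hno'
        · by_cases h4 : pvK4 <+: (c :: t)
          · obtain ⟨x, hx⟩ := h4
            have hno' : pvNoOv (pvK4 ++ x) := by rw [hx]; exact hno
            have hnt1 : ¬ pvK1.tail <+: x := fun hp =>
              hno' _ (by simp [pvBadsL]) (pv_bad_of_tail_prefix x hp)
            have hnt2 : ¬ pvK2.tail <+: x := fun hp =>
              hno' _ (by simp [pvBadsL]) (pv_bad_of_tail_prefix x hp)
            have hnt3 : ¬ pvK3.tail <+: x := fun hp =>
              hno' _ (by simp [pvBadsL]) (pv_bad_of_tail_prefix x hp)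
            rw [← hx, pv_comp_K4 x hnt1 hnt2 hnt3,
              pv_scan_K4 x (by rw [hx]; exact h1) (by rw [hx]; exact h2), ih x ?_ ?_]
            · have := congrArg List.length hx
              simp [pvK4] at this
              simp at hl
              omega
            · exact pvNoOv_mono (List.suffix_append _ _).isInfix hno'
          · by_cases h3 : pvK3 <+: (c :: t)
            · obtain ⟨x, hx⟩ := h3
              have hno' : pvNoOv (pvK3 ++ x) := by rw [hx]; exact hno
              have hnt1 : ¬ pvK1.tail <+: x := fun hp =>
                hno' _ (by simp [pvBadsL]) (pv_bad_of_tail_prefix x hp)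
              have hnt2 : ¬ pvK2.tail <+: x := fun hp =>
                hno' _ (by simp [pvBadsL]) (pv_bad_of_tail_prefix x hp)
              rw [← hx, pv_comp_K3 x hnt1 hnt2,
                pv_scan_K3 x (by rw [hx]; exact h1) (by rw [hx]; exact h2) (by rw [hx]; exact h4),
                ih x ?_ ?_]
              · have := congrArg List.length hx
                simp [pvK3] at this
                simp at hl
                omega
              · exact pvNoOv_mono (List.suffix_append _ _).isInfix hno'
            · have hnot : pvNoOv t := pvNoOv_mono (List.suffix_cons c t).isInfix hno
              by_cases hc : c = '/'
              · subst hc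
                rw [pv_comp_slash, pv_scan_slash, ih t hlen hnot]
              · rw [pv_comp_other c t hc h1 h2 h3 h4, pv_scan_other c t hc h1 h2 h3 h4,
                  ih t hlen hnot]

theorem pv_pre_noOv (s : String) (h : Pre_normalize_env_paths_py (some s)) :
    pvNoOv (PySem.Chars.stripChars (PySem.Chars.strip s.toList) "\"".toList) := by
  have hinf : PySem.Chars.stripChars (PySem.Chars.strip s.toList) "\"".toList <:+: s.toList :=
    (pv_infix_stripChars _ _).trans (pv_infix_strip _)
  unfold Pre_normalize_env_paths_py at h
  simp [pvBadStrs, List.all] at h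
  intro b hb hbl
  have hbs : b <:+: s.toList := hbl.trans hinf
  simp [pvBadsL] at hb
  rcases hb with rfl | rfl | rfl | rfl | rfl | rfl
  · rw [show pvK2 ++ pvK1.tail = (['%', 'W', 'i', 'n', 'D', 'i', 'r', '%', 'S', 'y', 's', 't', 'e', 'm', 'R', 'o', 'o', 't', '%'] : List Char) from by decide] at hbs
    exact ((PySem.Chars.isIn_eq_false_iff _ _).mp h.1) hbs
  · rw [show pvK3 ++ pvK1.tail = (['%', 'P', 'r', 'o', 'g', 'r', 'a', 'm', 'F', 'i', 'l', 'e', 's', '%', 'S', 'y', 's', 't', 'e', 'm', 'R', 'o', 'o', 't', '%'] : List Char) from by decide] at hbs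
    exact ((PySem.Chars.isIn_eq_false_iff _ _).mp h.2.1) hbs
  · rw [show pvK3 ++ pvK2.tail = (['%', 'P', 'r', 'o', 'g', 'r', 'a', 'm', 'F', 'i', 'l', 'e', 's', '%', 'W', 'i', 'n', 'D', 'i', 'r', '%'] : List Char) from by decide] at hbs
    exact ((PySem.Chars.isIn_eq_false_iff _ _).mp h.2.2.1) hbs
  · rw [show pvK4 ++ pvK1.tail = (['%', 'P', 'r', 'o', 'g', 'r', 'a', 'm', 'F', 'i', 'l', 'e', 's', '(', 'x', '8', '6', ')', '%', 'S', 'y', 's', 't', 'e', 'm', 'R', 'o', 'o', 't', '%'] : List Char) from by decide] at hbs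
    exact ((PySem.Chars.isIn_eq_false_iff _ _).mp h.2.2.2.1) hbs
  · rw [show pvK4 ++ pvK2.tail = (['%', 'P', 'r', 'o', 'g', 'r', 'a', 'm', 'F', 'i', 'l', 'e', 's', '(', 'x', '8', '6', ')', '%', 'W', 'i', 'n', 'D', 'i', 'r', '%'] : List Char) from by decide] at hbs
    exact ((PySem.Chars.isIn_eq_false_iff _ _).mp h.2.2.2.2.1) hbs
  · rw [show pvK4 ++ pvK3.tail = (['%', 'P', 'r', 'o', 'g', 'r', 'a', 'm', 'F', 'i', 'l', 'e', 's', '(', 'x', '8', '6', ')', '%', 'P', 'r', 'o', 'g', 'r', 'a', 'm', 'F', 'i', 'l', 'e', 's', '%'] : List Char) from by decide] at hbs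
    exact ((PySem.Chars.isIn_eq_false_iff _ _).mp h.2.2.2.2.2) hbs


-- ===== VERDICT (by name: the statement is the Claim_ definition above) =====
theorem normalize_env_paths_py_spec : Claim_equal_normalize_env_paths_py := by
  intro path hdom hpre
  unfold Spec_normalize_env_paths_py
  cases path with
  | none => rfl
  | some s =>
    show normalize_env_paths_py (some s) = normalize_env_paths_py_alt (some s)
    have hno := pv_pre_noOv s hpre
    unfold normalize_env_paths_py normalize_env_paths_py_alt
    simp only [List.foldl, PySem.Str.replace, String.toList_ofList,
      PySem.Str.toList_stripChars, PySem.Str.toList_strip]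
    rw [pvChars_replace_eq "%SystemRoot%".toList "C:\\Windows".toList _ (by decide)]
    rw [pvChars_replace_eq "%WinDir%".toList "C:\\Windows".toList _ (by decide)]
    rw [pvChars_replace_eq "%ProgramFiles%".toList "C:\\Program Files".toList _ (by decide)]
    rw [pvChars_replace_eq "%ProgramFiles(x86)%".toList "C:\\Program Files (x86)".toList _ (by decide)]
    rw [pvChars_replace_eq "/".toList "\\".toList _ (by decide)]
    rw [show ("/".toList : List Char) = ['/'] from by decide,
        show ("\\".toList : List Char) = ['\\'] from by decide]
    have heq := pv_comp_eq_scan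
      (PySem.Chars.stripChars (PySem.Chars.strip s.toList) "\"".toList).length
      (PySem.Chars.stripChars (PySem.Chars.strip s.toList) "\"".toList) le_rfl hno
    unfold pvComp pvK1 pvK2 pvK3 pvK4 pvV1 pvV3 pvV4 at heq
    rw [heq]
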